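-- pv_equiv track=rewrite | github.com/boruno/jvm-concurrency-dataset | scripts/processing/ResultsStatisticsScript.py | determine_final_result
-- ===== SOURCE A (Python) =====
-- def determine_final_result(tests):
--     """
--     Determine a final result based on test results using the new prioritization strategy:
--     - If there is only one test for a file – take its result.
--     - If both tests are present (modelCheckingTest and stressTest) – pick the result with priority:
--         1. Incorrect (concurrency violation): "Unexpected exception", "Execution hung",
--            "Invalid execution results", "Validation function error", "Non-blocking algorithm"
--         2. Testing errors: "Testing error"
--         3. Timeouts: "Timeout"
--         4. Lincheck bugs: "Lincheck bug"
--         5. Correct: "Correct"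
--     """
--     if len(tests) == 1:
--         return tests[0][1]
--
--     priority = {
--         "Unexpected exception": 1,
--         "Execution hung": 1,
--         "Invalid execution results": 1,
--         "Validation function error": 1,
--         "Non-blocking algorithm": 1,
--         "Testing error": 2,
--         "Timeout": 3,
--         "Lincheck bug": 4,
--         "Correct": 5
--     }
--
--     def get_priority(result):
--         return priority.get(result, 6)
--
--     # Pick the result with the highest priority (lowest number)
--     final_result = min((test[1] for test in tests), key=get_priority)
--     return final_result
-- ===== SOURCE B (Python) =====
-- def determine_final_result(tests):
--     priority = {
--         "Unexpected exception": 1,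
--         "Execution hung": 1,
--         "Invalid execution results": 1,
--         "Validation function error": 1,
--         "Non-blocking algorithm": 1,
--         "Testing error": 2,
--         "Timeout": 3,
--         "Lincheck bug": 4,
--         "Correct": 5
--     }
--     # Scan priority levels from best (1) to worst (6); within a level,
--     # take the first test in list order.  This is exactly the first
--     # minimal-priority result; the single-test case falls out naturally.
--     for level in range(1, 7):
--         for _, result in tests:
--             if priority.get(result, 6) == level:
--                 return result
--     raise ValueError("determine_final_result: no tests")
-- ===== Notes on version B (the rewrite author's own statement) =====
-- stated objective: alternative
-- what changed: Replaces the length-1 special case plus min(..., key=get_priority) with a uniform bucket scan: loop over priority levels 1..6 in order and return the first result whose rank equals the current level, which selects the same first minimal element.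
-- outside the precondition, e.g. on determine_final_result([]): A raises ValueError, B raises ValueError
import Mathlib
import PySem

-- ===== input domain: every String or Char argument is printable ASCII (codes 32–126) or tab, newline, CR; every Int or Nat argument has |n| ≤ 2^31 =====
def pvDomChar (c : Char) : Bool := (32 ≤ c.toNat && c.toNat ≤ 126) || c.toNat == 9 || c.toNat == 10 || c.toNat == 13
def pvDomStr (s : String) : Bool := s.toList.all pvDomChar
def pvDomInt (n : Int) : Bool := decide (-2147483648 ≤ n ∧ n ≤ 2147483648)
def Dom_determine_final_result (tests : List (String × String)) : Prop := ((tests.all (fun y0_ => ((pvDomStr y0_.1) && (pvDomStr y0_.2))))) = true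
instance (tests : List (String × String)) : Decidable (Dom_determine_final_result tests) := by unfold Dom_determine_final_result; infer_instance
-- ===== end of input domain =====

-- B replaces A's length-1 special case + min(..., key) with a uniform scan over
-- priority levels 1..6 returning the first result at the current level (objective: alternative).


-- ===== PORT A =====
-- the dict literal `priority` (shared data; both Pythons build the same mapping)
def priorityDict : PySem.Dict String Int := PySem.Dict.ofList
  [("Unexpected exception", 1), ("Execution hung", 1), ("Invalid execution results", 1),
   ("Validation function error", 1), ("Non-blocking algorithm", 1), ("Testing error", 2),
   ("Timeout", 3), ("Lincheck bug", 4), ("Correct", 5)]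

-- get_priority(result) = priority.get(result, 6)
def get_priority (result : String) : Int := PySem.Dict.getD priorityDict result 6

def determine_final_result (tests : List (String × String)) : String :=
  if PySem.List.len tests == 1 then
    match PySem.List.pyGet? tests 0 with
    | some t => t.2
    | none => ""          -- unreachable: len tests == 1
  else
    match PySem.List.min? (tests.map (fun t => t.2)) get_priority with
    | some r => r
    | none => ""          -- Python: min() of empty raises ValueError; excluded by Pre_

-- ===== PORT B =====
-- inner loop: first result in `tests` whose priority is `level`
def pickLevel (level : Int) : List (String × String) → Option String
  | [] => none
  | t :: ts => if get_priority t.2 == level then some t.2 else pickLevel level ts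

-- outer loop over the list of levels
def scanLevels (tests : List (String × String)) : List Int → String
  | [] => ""              -- Python B raises ValueError here; unreachable for nonempty tests
  | l :: ls =>
    match pickLevel l tests with
    | some r => r
    | none => scanLevels tests ls

def determine_final_result_alt (tests : List (String × String)) : String :=
  scanLevels tests (PySem.List.pyRange 1 7 1)

-- ===== PRECONDITION & SPEC =====
-- Pre_ excludes only the empty list, on which A's min() raises ValueError (B raises too).
def Pre_determine_final_result (tests : List (String × String)) : Prop := tests ≠ []
instance (tests : List (String × String)) : Decidable (Pre_determine_final_result tests) := by unfold Pre_determine_final_result; infer_instance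
def pvWitness_determine_final_result : (List (String × String)) := [("f.kt", "Timeout"), ("g.kt", "Correct")]

def Spec_determine_final_result (tests : List (String × String)) (out : String) : Prop := out = determine_final_result_alt tests
instance (tests : List (String × String)) (out : String) : Decidable (Spec_determine_final_result tests out) := by unfold Spec_determine_final_result; infer_instance

-- ===== CLAIM (what is proved, stated in full; the proofs are below) =====
def Claim_equal_determine_final_result : Prop := ∀ (tests : List (String × String)), Dom_determine_final_result tests → Pre_determine_final_result tests → Spec_determine_final_result tests (determine_final_result tests)

-- ===== LEMMAS AND PROOFS =====

-- the items of the literal dict, computed once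
lemma priorityDict_items : priorityDict.items =
    [("Unexpected exception", 1), ("Execution hung", 1), ("Invalid execution results", 1),
     ("Validation function error", 1), ("Non-blocking algorithm", 1), ("Testing error", 2),
     ("Timeout", 3), ("Lincheck bug", 4), ("Correct", 5)] := by decide

-- every priority is between 1 and 6
lemma rk_bounds (r : String) : 1 ≤ get_priority r ∧ get_priority r ≤ 6 := by
  unfold get_priority
  simp only [PySem.Dict.getD, PySem.Dict.get?, priorityDict_items, List.find?]
  repeat' split
  all_goals simp

-- running minimum of priorities (proof-side)
def Mr (rs : List String) : Int := rs.foldl (fun m x => min m (get_priority x)) 7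

-- the first minimal-priority element (proof-side characterisation both ports meet)
def fm (rs : List String) : Option String := rs.find? (fun x => decide (get_priority x ≤ Mr rs))

-- A's fold step, unwrapped
def gmin (b x : String) : String := if get_priority x < get_priority b then x else b

lemma foldl_min_shift (l : List String) : ∀ (m c : Int),
    l.foldl (fun m x => min m (get_priority x)) (min m c)
      = min m (l.foldl (fun m x => min m (get_priority x)) c) := by
  induction l with
  | nil => intro m c; rfl
  | cons a l ih =>
    intro m c
    simp only [List.foldl]
    rw [min_assoc]
    exact ih m (min c (get_priority a))

lemma Mr_cons (a : String) (l : List String) : Mr (a :: l) = min (get_priority a) (Mr l) := by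
  unfold Mr
  simp only [List.foldl]
  rw [min_comm 7 (get_priority a)]
  exact foldl_min_shift l (get_priority a) 7

lemma Mr_le_mem {rs : List String} {x : String} (hx : x ∈ rs) : Mr rs ≤ get_priority x := by
  induction rs with
  | nil => cases hx
  | cons a l ih =>
    rw [Mr_cons]
    rcases List.mem_cons.mp hx with h | h
    · subst h; omega
    · have := ih h; omega

lemma Mr_pos (rs : List String) : 1 ≤ Mr rs := by
  induction rs with
  | nil => unfold Mr; simp
  | cons a l ih =>
    have := (rk_bounds a).1
    rw [Mr_cons]
    omega

lemma Mr_le_six {rs : List String} (h : rs ≠ []) : Mr rs ≤ 6 := by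
  obtain ⟨r, rs', rfl⟩ := List.exists_cons_of_ne_nil h
  have := (rk_bounds r).2
  rw [Mr_cons]
  omega

-- find? only looks at members, so congruence on members suffices (not in Mathlib under this form)
lemma find?_congr_mem {α : Type} {p q : α → Bool} :
    ∀ {l : List α}, (∀ x ∈ l, p x = q x) → l.find? p = l.find? q := by
  intro l
  induction l with
  | nil => intro _; rfl
  | cons a l ih =>
    intro h
    simp only [List.find?]
    rw [h a List.mem_cons_self]
    split
    · rfl
    · exact ih (fun x hx => h x (List.mem_cons_of_mem a hx))

lemma min?_cons_eq : ∀ (l : List String) (a : String),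
    PySem.List.min? (a :: l) get_priority = some (l.foldl gmin a) := by
  intro l
  induction l with
  | nil => intro a; rfl
  | cons x l ih =>
    intro a
    have h1 : PySem.List.min? (a :: x :: l) get_priority
        = PySem.List.min? (gmin a x :: l) get_priority := by
      unfold PySem.List.min? gmin
      simp only [List.foldl]
      split <;> rfl
    rw [h1, ih (gmin a x)]
    simp only [List.foldl]

-- A's fold computes the first minimal element
lemma fm_eq_foldl (l : List String) (a : String) :
    fm (a :: l) = some (l.foldl gmin a) := by
  induction l generalizing a with
  | nil =>
    have := (rk_bounds a).2
    have h : decide (get_priority a ≤ Mr [a]) = true := by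
      rw [Mr_cons]
      simp only [decide_eq_true_eq]
      unfold Mr
      simp only [List.foldl]
      omega
    simp [fm, List.find?, h]
  | cons x l ih =>
    have hax := rk_bounds a
    have hxx := rk_bounds x
    simp only [List.foldl, gmin]
    by_cases hlt : get_priority x < get_priority a
    · simp only [if_pos hlt]
      rw [← ih x]
      unfold fm
      have hM : Mr (a :: x :: l) = Mr (x :: l) := by
        simp only [Mr_cons]; omega
      rw [hM]
      have hafail : decide (get_priority a ≤ Mr (x :: l)) = false := by
        simp only [decide_eq_false_iff_not, not_le, Mr_cons]
        have := Mr_pos l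
        omega
      simp only [List.find?, hafail]
    · simp only [if_neg hlt]
      rw [← ih a]
      unfold fm
      have hM : Mr (a :: x :: l) = min (get_priority a) (min (get_priority x) (Mr l)) := by
        simp only [Mr_cons]
      have hM' : Mr (a :: l) = min (get_priority a) (Mr l) := Mr_cons a l
      by_cases hal : get_priority a ≤ Mr l
      · have h1 : decide (get_priority a ≤ Mr (a :: x :: l)) = true := by
          rw [hM]; simp only [decide_eq_true_eq]; omega
        have h2 : decide (get_priority a ≤ Mr (a :: l)) = true := by
          rw [hM']; simp only [decide_eq_true_eq]; omega
        simp only [List.find?, h1, h2]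
      · have hMt : Mr (a :: x :: l) = Mr l := by rw [hM]; omega
        have hMt' : Mr (a :: l) = Mr l := by rw [hM']; omega
        rw [hMt, hMt']
        have ha : decide (get_priority a ≤ Mr l) = false := by
          simp only [decide_eq_false_iff_not]; omega
        have hx2 : decide (get_priority x ≤ Mr l) = false := by
          simp only [decide_eq_false_iff_not]; omega
        simp only [List.find?, ha, hx2]

-- B's inner loop is find? on the results
lemma pickLevel_eq_find (level : Int) (tests : List (String × String)) :
    pickLevel level tests = (tests.map (fun t => t.2)).find? (fun x => get_priority x == level) := by
  induction tests with
  | nil => rfl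
  | cons t ts ih =>
    by_cases h : get_priority t.2 == level
    · simp [pickLevel, h]
    · simp [pickLevel, h, ih]

-- B's outer loop reaches exactly the first minimal element
lemma scanLevels_eq_fm (n : Nat) (k : Int) (tests : List (String × String))
    (hne : tests ≠ []) (hk1 : 1 ≤ k) (hkM : k ≤ Mr (tests.map (fun t => t.2)))
    (hfuel : (7 - k).toNat ≤ n) :
    scanLevels tests (PySem.List.pyRange k 7 1) = (fm (tests.map (fun t => t.2))).getD "" := by
  have hrsne : tests.map (fun t => t.2) ≠ [] :=
    fun hm => hne (List.map_eq_nil_iff.mp hm)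
  have hM6 : Mr (tests.map (fun t => t.2)) ≤ 6 := Mr_le_six hrsne
  induction n generalizing k with
  | zero => omega
  | succ n ih =>
    have hk7 : k < 7 := by omega
    rw [PySem.List.pyRange_one_cons hk7]
    simp only [scanLevels]
    rw [pickLevel_eq_find]
    by_cases heq : k = Mr (tests.map (fun t => t.2))
    · have hcong : ∀ x ∈ tests.map (fun t => t.2),
          (get_priority x == k) = decide (get_priority x ≤ Mr (tests.map (fun t => t.2))) := by
        intro x hx
        have hge := Mr_le_mem hx
        by_cases h : get_priority x = k
        · simp [h, ← heq]
        · have hgt : ¬ get_priority x ≤ Mr (tests.map (fun t => t.2)) := by omega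
          simp [h, hgt]
      rw [find?_congr_mem hcong]
      obtain ⟨r, rs', hcons⟩ := List.exists_cons_of_ne_nil hrsne
      have hfm : fm (tests.map (fun t => t.2)) = some (rs'.foldl gmin r) := by
        rw [hcons]; exact fm_eq_foldl rs' r
      have hfm2 := hfm
      unfold fm at hfm2
      rw [hfm2, hfm]
      rfl
    · have hnone :
          (tests.map (fun t => t.2)).find? (fun x => get_priority x == k) = none := by
        rw [List.find?_eq_none]
        intro x hx
        have := Mr_le_mem hx
        simp only [beq_iff_eq]
        omega
      rw [hnone]
      exact ih (k + 1) (by omega) (by omega) (by omega)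

-- ===== VERDICT (by name: the statement is the Claim_ definition above) =====
theorem determine_final_result_spec : Claim_equal_determine_final_result := by
  intro tests _ hpre
  unfold Spec_determine_final_result determine_final_result determine_final_result_alt
  have hrsne : tests.map (fun t => t.2) ≠ [] :=
    fun hm => hpre (List.map_eq_nil_iff.mp hm)
  have hB : scanLevels tests (PySem.List.pyRange 1 7 1)
      = (fm (tests.map (fun t => t.2))).getD "" :=
    scanLevels_eq_fm 6 1 tests hpre le_rfl (Mr_pos _) (by omega)
  rw [hB]
  obtain ⟨r, rs', hcons⟩ := List.exists_cons_of_ne_nil hrsne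
  have hfm : fm (tests.map (fun t => t.2)) = some (rs'.foldl gmin r) := by
    rw [hcons]; exact fm_eq_foldl rs' r
  by_cases hlen : tests.length = 1
  · obtain ⟨t, rfl⟩ := List.length_eq_one_iff.mp hlen
    simp only [List.map_cons, List.map_nil, List.cons.injEq] at hcons
    simp only [PySem.List.len_eq, hlen, PySem.List.pyGet?_zero_cons]
    rw [hfm]
    simp only [List.map_cons, List.map_nil] at hfm ⊢
    rw [show fm [t.2] = some t.2 from fm_eq_foldl [] t.2] at hfm
    simp only [Option.some.injEq] at hfm
    simp [← hfm, hcons.1]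
  · have hlen' : (PySem.List.len tests == 1) = false := by
      simp [PySem.List.len_eq, hlen]
    simp only [hlen', Bool.false_eq_true]
    have hmin : PySem.List.min? (tests.map (fun t => t.2)) get_priority
        = some (rs'.foldl gmin r) := by
      rw [hcons]
      exact min?_cons_eq rs' r
    rw [hmin, hfm]
    rfl
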